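-- pv_equiv track=rewrite | github.com/infoai1/bookchunker | chunker.py | chunk_by_chapter
-- ===== SOURCE A (Python) =====
-- from typing import List, Tuple, Optional
--
-- DEFAULT_TITLE = "Introduction"
--
-- def chunk_by_chapter(
--     structured: List[Tuple[str, str, Optional[str]]]
-- ) -> List[Tuple[str, str, str]]:
--     if not structured: return []
--     out, chunk, marks, cur_title = [], [], [], DEFAULT_TITLE
--     for sent, mark, heading in structured:
--         if heading and heading != cur_title:
--             if chunk:
--                 out.append((" ".join(chunk), marks[0], cur_title))
--             chunk, marks, cur_title = [], [], heading
--         chunk.append(sent); marks.append(mark)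
--     out.append((" ".join(chunk), marks[0], cur_title))
--     return out
-- ===== SOURCE B (Python) =====
-- from typing import List, Tuple, Optional
--
-- DEFAULT_TITLE = "Introduction"
--
-- def _chunks(rest, title):
--     # rest is nonempty; its first element starts a chunk titled `title`
--     i = 1
--     while i < len(rest):
--         h = rest[i][2]
--         if h and h != title:
--             break
--         i += 1
--     chunk = (" ".join(s for s, _, _ in rest[:i]), rest[0][1], title)
--     if i == len(rest):
--         return [chunk]
--     return [chunk] + _chunks(rest[i:], rest[i][2])
--
-- def chunk_by_chapter(
--     structured: List[Tuple[str, str, Optional[str]]]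
-- ) -> List[Tuple[str, str, str]]:
--     if not structured:
--         return []
--     h0 = structured[0][2]
--     return _chunks(structured, h0 if h0 else DEFAULT_TITLE)
-- ===== Notes on version B (the rewrite author's own statement) =====
-- stated objective: alternative
-- what changed: Replaces A's single fold with mutable flush state (out/chunk/marks/cur_title) by a recursive group-at-a-time decomposition: each step scans for the next chapter boundary, emits one chunk from that slice, and recurses on the remainder with the new title.
import Mathlib
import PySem

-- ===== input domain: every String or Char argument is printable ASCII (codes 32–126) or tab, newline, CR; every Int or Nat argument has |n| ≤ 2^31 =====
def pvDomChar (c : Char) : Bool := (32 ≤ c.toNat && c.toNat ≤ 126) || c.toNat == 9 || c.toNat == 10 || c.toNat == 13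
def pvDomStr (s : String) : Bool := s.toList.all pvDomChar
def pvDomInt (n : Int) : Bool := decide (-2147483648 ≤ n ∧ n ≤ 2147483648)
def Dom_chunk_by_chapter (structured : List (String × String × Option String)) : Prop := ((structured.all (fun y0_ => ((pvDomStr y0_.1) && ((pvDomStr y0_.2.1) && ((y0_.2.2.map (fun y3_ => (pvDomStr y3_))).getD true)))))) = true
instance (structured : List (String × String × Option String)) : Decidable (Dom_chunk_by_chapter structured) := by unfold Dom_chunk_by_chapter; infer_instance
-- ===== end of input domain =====

-- B replaces A's inline-flush fold by a recursive group-at-a-time decomposition (alternative, same cost).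


-- ===== PORT A =====
-- Python: `if heading and heading != cur_title`
def pvNewHeading (heading : Option String) (cur : String) : Bool :=
  match heading with
  | none => false
  | some h => decide (h ≠ "") && decide (h ≠ cur)

-- one iteration of A's for-loop over state (out, chunk, marks, cur_title)
def pvStepA
    (st : List (String × String × String) × List String × List String × String)
    (x : String × String × Option String) :
    List (String × String × String) × List String × List String × String :=
  let (out, chunk, marks, cur) := st
  let (sent, mark, heading) := x
  if pvNewHeading heading cur then
    let out := if chunk.isEmpty then out
      else out ++ [(PySem.Str.join " " chunk, (PySem.List.pyGet? marks 0).getD "", cur)]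
    -- chunk, marks reset to [] then sent/mark appended
    (out, [sent], [mark], heading.getD "")
  else
    (out, chunk ++ [sent], marks ++ [mark], cur)

def chunk_by_chapter (structured : List (String × String × Option String)) : List (String × String × String) :=
  if structured.isEmpty then [] else
  let st := structured.foldl pvStepA ([], [], [], "Introduction")
  st.1 ++ [(PySem.Str.join " " st.2.1, (PySem.List.pyGet? st.2.2.1 0).getD "", st.2.2.2)]

-- ===== PORT B =====
-- B's while loop: does this element start a new chapter (`h and h != title`)?
def pvBreaks (heading : Option String) (title : String) : Bool :=
  match heading with
  | none => false
  | some h => decide (h ≠ "") && decide (h ≠ title)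

-- the index scan of _chunks: split the tail at the first boundary element
def pvSplitRun (title : String) :
    List (String × String × Option String) →
    List (String × String × Option String) × List (String × String × Option String)
  | [] => ([], [])
  | x :: xs =>
    if pvBreaks x.2.2 title then ([], x :: xs)
    else
      let s := pvSplitRun title xs
      (x :: s.1, s.2)

lemma pvSplitRun_snd_length (title : String) (xs : List (String × String × Option String)) :
    (pvSplitRun title xs).2.length ≤ xs.length := by
  induction xs with
  | nil => simp [pvSplitRun]
  | cons x xs ih =>
    simp only [pvSplitRun]
    split
    · simp
    · exact Nat.le_succ_of_le ih

def pvChunks (rest : List (String × String × Option String)) (title : String) :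
    List (String × String × String) :=
  match rest with
  | [] => []  -- unreachable in Source B (_chunks is only called with nonempty rest)
  | x :: xs =>
    let s := pvSplitRun title xs
    let c := (PySem.Str.join " " ((x :: s.1).map (·.1)), x.2.1, title)
    if hr : s.2 = [] then [c]
    else c :: pvChunks s.2 ((s.2.head hr).2.2.getD "")
termination_by rest.length
decreasing_by
  simp only [List.length_cons]
  exact Nat.lt_succ_of_le (pvSplitRun_snd_length title xs)

def chunk_by_chapter_alt (structured : List (String × String × Option String)) : List (String × String × String) :=
  match structured with
  | [] => []
  | x :: _ =>
    let title := match x.2.2 with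
      | none => "Introduction"
      | some h => if h = "" then "Introduction" else h
    pvChunks structured title

-- ===== PRECONDITION & SPEC =====
def Spec_chunk_by_chapter (structured : List (String × String × Option String)) (out : List (String × String × String)) : Prop := out = chunk_by_chapter_alt structured
instance (structured : List (String × String × Option String)) (out : List (String × String × String)) : Decidable (Spec_chunk_by_chapter structured out) := by unfold Spec_chunk_by_chapter; infer_instance

-- ===== CLAIM (what is proved, stated in full; the proofs are below) =====
def Claim_equal_chunk_by_chapter : Prop := ∀ (structured : List (String × String × Option String)), Dom_chunk_by_chapter structured → Spec_chunk_by_chapter structured (chunk_by_chapter structured)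

-- ===== LEMMAS AND PROOFS =====

-- A's tail: run the remaining loop iterations from state st and append the final flush
def runA (L : List (String × String × Option String))
    (st : List (String × String × String) × List String × List String × String) :
    List (String × String × String) :=
  let st := L.foldl pvStepA st
  st.1 ++ [(PySem.Str.join " " st.2.1, (PySem.List.pyGet? st.2.2.1 0).getD "", st.2.2.2)]

-- B's value of the "current open group (chunk, marks, cur) followed by remaining input L"
def mergeB (chunk marks : List String) (cur : String)
    (L : List (String × String × Option String)) : List (String × String × String) :=
  let s := pvSplitRun cur L
  let c := (PySem.Str.join " " (chunk ++ s.1.map (·.1)), (PySem.List.pyGet? marks 0).getD "", cur)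
  if hr : s.2 = [] then [c]
  else c :: pvChunks s.2 ((s.2.head hr).2.2.getD "")

lemma pvChunks_cons (x : String × String × Option String)
    (xs : List (String × String × Option String)) (title : String) :
    pvChunks (x :: xs) title = mergeB [x.1] [x.2.1] title xs := by
  rw [pvChunks, mergeB]
  simp

lemma runA_eq (L : List (String × String × Option String))
    (out : List (String × String × String)) (chunk marks : List String) (cur : String)
    (hc : chunk ≠ []) (hm : marks ≠ []) :
    runA L (out, chunk, marks, cur) = out ++ mergeB chunk marks cur L := by
  induction L generalizing out chunk marks cur with
  | nil =>
    simp [runA, mergeB, pvSplitRun]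
  | cons x L ih =>
    obtain ⟨m, ms, rfl⟩ : ∃ m ms, marks = m :: ms := by
      cases marks with
      | nil => exact absurd rfl hm
      | cons a b => exact ⟨a, b, rfl⟩
    by_cases hb : pvBreaks x.2.2 cur
    · have hb' : pvNewHeading x.2.2 cur = true := hb
      have hstep : pvStepA (out, chunk, m :: ms, cur) x =
          (out ++ [(PySem.Str.join " " chunk, (PySem.List.pyGet? (m :: ms) 0).getD "", cur)],
           [x.1], [x.2.1], x.2.2.getD "") := by
        simp [pvStepA, hb', hc]
      rw [runA, List.foldl_cons, hstep]
      rw [show (List.foldl pvStepA _ L).1 ++ _ = runA L (_, [x.1], [x.2.1], x.2.2.getD "") from rfl]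
      rw [ih _ _ _ _ (by simp) (by simp)]
      conv_rhs => rw [mergeB]
      simp only [pvSplitRun, hb, if_pos]
      simp only [List.map_nil, List.append_nil, List.head_cons]
      rw [pvChunks_cons]
      simp
    · have hb' : pvNewHeading x.2.2 cur = false := by
        simpa [pvBreaks, pvNewHeading] using hb
      have hstep : pvStepA (out, chunk, m :: ms, cur) x =
          (out, chunk ++ [x.1], (m :: ms) ++ [x.2.1], cur) := by
        simp [pvStepA, hb']
      rw [runA, List.foldl_cons, hstep]
      rw [show (List.foldl pvStepA _ L).1 ++ _ = runA L (out, chunk ++ [x.1], (m :: ms) ++ [x.2.1], cur) from rfl]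
      rw [ih _ _ _ _ (by simp) (by simp)]
      conv_rhs => rw [mergeB]
      simp only [pvSplitRun, hb, if_neg, Bool.false_eq_true, not_false_iff]
      rw [mergeB]
      simp [PySem.List.pyGet?_zero_cons, List.append_assoc]

-- ===== VERDICT (by name: the statement is the Claim_ definition above) =====
theorem chunk_by_chapter_spec : Claim_equal_chunk_by_chapter := by
  intro structured _
  unfold Spec_chunk_by_chapter
  cases structured with
  | nil => rfl
  | cons x xs =>
    have hT : pvStepA ([], [], [], "Introduction") x =
        ([], [x.1], [x.2.1],
         if pvNewHeading x.2.2 "Introduction" then x.2.2.getD "" else "Introduction") := by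
      by_cases hb : pvNewHeading x.2.2 "Introduction" <;> simp [pvStepA, hb]
    have h1 : chunk_by_chapter (x :: xs) =
        runA xs ([], [x.1], [x.2.1],
          if pvNewHeading x.2.2 "Introduction" then x.2.2.getD "" else "Introduction") := by
      rw [chunk_by_chapter]
      simp only [List.isEmpty_cons, Bool.false_eq_true, if_false, List.foldl_cons, hT]
      rfl
    rw [h1, runA_eq _ _ _ _ _ (by simp) (by simp), ← pvChunks_cons]
    rw [chunk_by_chapter_alt]
    rcases x with ⟨s, mk, h⟩
    cases h with
    | none => rfl
    | some hh =>
      by_cases he : hh = ""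
      · simp [pvNewHeading, he]
      · by_cases hi : hh = "Introduction"
        · simp [pvNewHeading, hi]
        · simp [pvNewHeading, he, hi]
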